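-- pv_equiv track=rewrite | github.com/juliawal/MOTIF | src/motif_utils/evaluation_utils.py | get_same_degree_genes
-- ===== SOURCE A (Python) =====
-- def get_same_degree_genes(degrees, graph_degrees):
--     """
--     Maps each gene to other genes with the same or nearest degree in the network.
--     """
--     mapping = {}
--     unique_degs = set(graph_degrees.values())
--     for gene, deg in degrees.items():
--         step = 0
--         same = []
--         while not same:
--             possible = {deg + step, deg - step} & unique_degs
--             same = [g for g, dg in graph_degrees.items() if dg in possible]
--             step += 1
--         mapping[gene] = same
--     return mapping
-- ===== SOURCE B (Python) =====
-- def get_same_degree_genes(degrees, graph_degrees):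
--     """
--     Maps each gene to other genes with the same or nearest degree in the network.
--     B: instead of searching outward step by step, compute the minimal distance
--     directly with a min() pass, then collect the genes at that distance.
--     """
--     mapping = {}
--     for gene, deg in degrees.items():
--         m = min(abs(dg - deg) for dg in graph_degrees.values())
--         mapping[gene] = [g for g, dg in graph_degrees.items() if abs(dg - deg) == m]
--     return mapping
-- ===== Notes on version B (the rewrite author's own statement) =====
-- stated objective: alternative
-- what changed: Replaces A's outward ring search (a while loop that grows the candidate distance by one and rescans the whole graph each step, via set intersections) with a direct one-pass min of |dg-deg| followed by a single filter at that distance.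
-- outside the precondition, e.g. on get_same_degree_genes({'a': 1}, {}): A does not finish within the time limit, B raises ValueError
import Mathlib
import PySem

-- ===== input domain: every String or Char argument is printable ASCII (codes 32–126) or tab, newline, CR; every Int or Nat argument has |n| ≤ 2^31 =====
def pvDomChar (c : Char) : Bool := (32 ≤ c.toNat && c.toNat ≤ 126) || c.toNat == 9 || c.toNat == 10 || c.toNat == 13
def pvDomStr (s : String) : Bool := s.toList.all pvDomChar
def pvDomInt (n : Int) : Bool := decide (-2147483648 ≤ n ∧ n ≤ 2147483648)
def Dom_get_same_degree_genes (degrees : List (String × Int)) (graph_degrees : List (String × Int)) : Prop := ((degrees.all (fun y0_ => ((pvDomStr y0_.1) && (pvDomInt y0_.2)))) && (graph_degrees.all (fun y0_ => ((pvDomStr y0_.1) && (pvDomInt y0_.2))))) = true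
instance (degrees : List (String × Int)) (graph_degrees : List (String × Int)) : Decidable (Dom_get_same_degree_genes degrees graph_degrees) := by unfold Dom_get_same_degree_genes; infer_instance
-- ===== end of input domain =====

-- B replaces A's step-by-step outward ring search with one min pass plus one filter (alternative algorithm, same result).
-- A's `while` loop never ends when graph_degrees is empty, so Pre_ requires graph_degrees ≠ [].

-- ===== PORT A =====
-- fuel for A's `while not same` loop; under Dom (|ints| ≤ 2^31) and a nonempty graph the
-- loop stops within 2^33 steps, so this fuel is never exhausted on admitted inputs.
def pvFuel : Nat := 1099511627776  -- 2^40

-- the `while not same:` loop of A, step for step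
def pvLoopA (unique_degs : PySem.Set Int) (graph_degrees : List (String × Int)) (deg : Int) : Nat → Int → List String
  | 0, _ => []
  | f + 1, step =>
    let possible := PySem.Set.inter (PySem.Set.ofList [deg + step, deg - step]) unique_degs
    let same := (graph_degrees.filter (fun p => PySem.Set.contains possible p.2)).map Prod.fst
    if same.isEmpty then pvLoopA unique_degs graph_degrees deg f (step + 1) else same

def get_same_degree_genes (degrees : List (String × Int)) (graph_degrees : List (String × Int)) : List (String × List String) :=
  let unique_degs := PySem.Set.ofList (graph_degrees.map Prod.snd)
  (degrees.foldl
    (fun mapping p => PySem.Dict.insert mapping p.1 (pvLoopA unique_degs graph_degrees p.2 pvFuel 0))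
    PySem.Dict.empty).items

-- ===== PORT B =====
-- abs(dg - deg) is ported as ((dg - deg).natAbs : Int), exact on Int
def get_same_degree_genes_alt (degrees : List (String × Int)) (graph_degrees : List (String × Int)) : List (String × List String) :=
  (degrees.foldl
    (fun mapping p =>
      let same :=
        match PySem.List.min? (graph_degrees.map (fun q => ((q.2 - p.2).natAbs : Int))) (fun x => x) with
        | some m => (graph_degrees.filter (fun q => decide (((q.2 - p.2).natAbs : Int) = m))).map Prod.fst
        | none => []   -- Python's min raises here (graph empty); outside Pre_
      PySem.Dict.insert mapping p.1 same)
    PySem.Dict.empty).items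

-- ===== PRECONDITION & SPEC =====
-- Pre_ excludes only the empty graph_degrees, on which A's while loop never terminates.
def Pre_get_same_degree_genes (degrees : List (String × Int)) (graph_degrees : List (String × Int)) : Prop := graph_degrees ≠ []
instance (degrees : List (String × Int)) (graph_degrees : List (String × Int)) : Decidable (Pre_get_same_degree_genes degrees graph_degrees) := by unfold Pre_get_same_degree_genes; infer_instance

def pvWitness_get_same_degree_genes : (List (String × Int)) × (List (String × Int)) := ([("a", 1), ("b", 5)], [("x", 2), ("y", 4), ("z", 2)])

def Spec_get_same_degree_genes (degrees : List (String × Int)) (graph_degrees : List (String × Int)) (out : List (String × List String)) : Prop := out = get_same_degree_genes_alt degrees graph_degrees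
instance (degrees : List (String × Int)) (graph_degrees : List (String × Int)) (out : List (String × List String)) : Decidable (Spec_get_same_degree_genes degrees graph_degrees out) := by unfold Spec_get_same_degree_genes; infer_instance

-- ===== CLAIM (what is proved, stated in full; the proofs are below) =====
def Claim_equal_get_same_degree_genes : Prop := ∀ (degrees : List (String × Int)) (graph_degrees : List (String × Int)), Dom_get_same_degree_genes degrees graph_degrees → Pre_get_same_degree_genes degrees graph_degrees → Spec_get_same_degree_genes degrees graph_degrees (get_same_degree_genes degrees graph_degrees)

-- ===== LEMMAS AND PROOFS =====

-- A's loop, started at step s ≤ m with enough fuel, returns exactly the genes at distance m,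
-- where m is the minimal achieved distance.
lemma pvLoopA_spec (graph : List (String × Int)) (deg m : Int)
    (hmem : ∃ q ∈ graph, ((q.2 - deg).natAbs : Int) = m)
    (hmin : ∀ q ∈ graph, m ≤ ((q.2 - deg).natAbs : Int)) :
    ∀ (f : Nat) (s : Int), 0 ≤ s → s ≤ m → (m - s).toNat < f →
    pvLoopA (PySem.Set.ofList (graph.map Prod.snd)) graph deg f s
      = (graph.filter (fun q => decide (((q.2 - deg).natAbs : Int) = m))).map Prod.fst := by
  intro f
  induction f with
  | zero => intro s _ _ hf; omega
  | succ f ih =>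
    intro s h0 hsm hf
    simp only [pvLoopA]
    have hfilt : graph.filter (fun p => PySem.Set.contains (PySem.Set.inter (PySem.Set.ofList [deg + s, deg - s]) (PySem.Set.ofList (graph.map Prod.snd))) p.2)
        = graph.filter (fun q => decide (((q.2 - deg).natAbs : Int) = s)) := by
      apply List.filter_congr
      intro q hq
      rw [Bool.eq_iff_iff]
      simp only [PySem.Set.contains_iff, PySem.Set.mem_inter, PySem.Set.mem_ofList,
        List.mem_cons, List.not_mem_nil, or_false, decide_eq_true_eq,
        List.mem_map]
      constructor
      · rintro ⟨h, -⟩; omega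
      · intro h; exact ⟨by omega, ⟨q, hq, rfl⟩⟩
    rw [hfilt]
    by_cases hs : s = m
    · subst hs
      obtain ⟨q0, hq0, hq0m⟩ := hmem
      have hmem' : q0.1 ∈ (graph.filter (fun q => decide (((q.2 - deg).natAbs : Int) = s))).map Prod.fst :=
        List.mem_map_of_mem (List.mem_filter.mpr ⟨hq0, by simpa using hq0m⟩)
      have hne' := List.ne_nil_of_mem hmem'
      rw [if_neg (by simp only [List.isEmpty_iff]; exact hne')]
    · have hnil : graph.filter (fun q => decide (((q.2 - deg).natAbs : Int) = s)) = [] := by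
        apply List.filter_eq_nil_iff.mpr
        intro q hq
        have := hmin q hq
        simp only [decide_eq_true_eq]
        omega
      rw [hnil]
      simp only [List.map_nil, List.isEmpty_nil, if_pos]
      exact ih (s + 1) (by omega) (by omega) (by omega)

lemma pvGene_eq (graph : List (String × Int)) (deg : Int) (hne : graph ≠ [])
    (hg : ∀ q ∈ graph, pvDomInt q.2 = true) (hdeg : pvDomInt deg = true) :
    pvLoopA (PySem.Set.ofList (graph.map Prod.snd)) graph deg pvFuel 0
      = (match PySem.List.min? (graph.map (fun q => ((q.2 - deg).natAbs : Int))) (fun x => x) with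
         | some m => (graph.filter (fun q => decide (((q.2 - deg).natAbs : Int) = m))).map Prod.fst
         | none => []) := by
  cases hmq : PySem.List.min? (graph.map (fun q => ((q.2 - deg).natAbs : Int))) (fun x => x) with
  | none =>
    exact absurd ((PySem.List.min?_eq_none_iff _ _).mp hmq) (by simpa using hne)
  | some m =>
    have hm_mem := PySem.List.min?_mem hmq
    have hm_min := PySem.List.min?_isMin hmq
    obtain ⟨q0, hq0, hq0m⟩ := List.mem_map.mp hm_mem
    have hbq : pvDomInt q0.2 = true := hg q0 hq0
    unfold pvDomInt at hbq hdeg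
    simp only [decide_eq_true_eq] at hbq hdeg
    apply pvLoopA_spec graph deg m ⟨q0, hq0, hq0m⟩
    · intro q hq
      exact hm_min _ (List.mem_map_of_mem hq)
    · omega
    · omega
    · unfold pvFuel; omega

-- ===== VERDICT (by name: the statement is the Claim_ definition above) =====
theorem get_same_degree_genes_spec : Claim_equal_get_same_degree_genes := by
  intro degrees graph hdom hpre
  unfold Dom_get_same_degree_genes at hdom
  simp only [Bool.and_eq_true, List.all_eq_true] at hdom
  obtain ⟨hd, hg⟩ := hdom
  unfold Spec_get_same_degree_genes get_same_degree_genes get_same_degree_genes_alt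
  refine congrArg PySem.Dict.items (PySem.List.foldl_congr_mem _ _ _ _ ?_)
  intro acc p hp
  congr 1
  exact pvGene_eq graph p.2 hpre (fun q hq => (hg q hq).2) (hd p hp).2
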